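-- pv_equiv track=rewrite | github.com/ValiantBadger/programmering | programmering/Finns.I.Sjön.py | kolla_fyra_av_samma
-- ===== SOURCE A (Python) =====
-- def kolla_fyra_av_samma(spelare):
--     poäng = 0
--     for kort in set(spelare):
--         if spelare.count(kort) == 4:
--             poäng += 1
--             for _ in range(4):
--                 spelare.remove(kort)
--     return poäng
-- ===== SOURCE B (Python) =====
-- def kolla_fyra_av_samma(spelare):
--     counts = {}
--     for kort in spelare:
--         counts[kort] = counts.get(kort, 0) + 1
--     four = {k for k, v in counts.items() if v == 4}
--     spelare[:] = [k for k in spelare if k not in four]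
--     return len(four)
-- ===== Notes on version B (the rewrite author's own statement) =====
-- stated objective: faster
-- what changed: B counts all cards in one dict pass and filters the original list once, instead of A's per-distinct-value list.count scan plus four list.remove scans.
import Mathlib
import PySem

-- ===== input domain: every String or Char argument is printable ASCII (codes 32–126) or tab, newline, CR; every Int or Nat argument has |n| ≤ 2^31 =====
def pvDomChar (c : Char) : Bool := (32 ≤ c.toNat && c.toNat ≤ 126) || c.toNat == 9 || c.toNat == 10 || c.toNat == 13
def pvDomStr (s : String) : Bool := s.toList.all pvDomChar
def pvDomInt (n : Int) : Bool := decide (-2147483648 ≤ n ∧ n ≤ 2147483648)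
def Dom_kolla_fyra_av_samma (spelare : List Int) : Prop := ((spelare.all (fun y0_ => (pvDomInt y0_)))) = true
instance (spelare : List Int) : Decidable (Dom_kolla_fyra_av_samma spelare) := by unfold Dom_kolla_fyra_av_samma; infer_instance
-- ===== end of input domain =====

-- B replaces A's per-distinct-value count/remove scans by one counting pass; the
-- in-place mutation of `spelare` (same final list in both Pythons) is not modeled —
-- the equivalence proved here is about the RETURN value only.

-- ===== PORT A =====
-- for kort in set(spelare): if spelare.count(kort) == 4: poäng += 1; for _ in range(4): spelare.remove(kort)
-- `spelare.remove(kort)` is `(remove? l kort).getD l`; exact here since the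
-- remove is only reached while kort is still present (count == 4).
def kolla_fyra_av_samma (spelare : List Int) : Int :=
  ((PySem.Set.ofList spelare).foldl
    (fun st kort =>
      if st.1.count kort == 4 then
        ((PySem.List.pyRange 0 4 1).foldl
          (fun l _ => (PySem.List.remove? l kort).getD l) st.1, st.2 + 1)
      else st)
    (spelare, (0 : Int))).2

-- ===== PORT B =====
def kolla_fyra_av_samma_alt (spelare : List Int) : Int :=
  let counts : PySem.Dict Int Int :=
    spelare.foldl (fun d kort => d.insert kort (d.getD kort 0 + 1)) PySem.Dict.empty
  let four : PySem.Set Int :=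
    PySem.Set.ofList ((counts.items.filter (fun p => p.2 == 4)).map (·.1))
  (PySem.Set.len four : Int)

-- ===== PRECONDITION & SPEC =====
def Spec_kolla_fyra_av_samma (spelare : List Int) (out : Int) : Prop := out = kolla_fyra_av_samma_alt spelare
instance (spelare : List Int) (out : Int) : Decidable (Spec_kolla_fyra_av_samma spelare out) := by unfold Spec_kolla_fyra_av_samma; infer_instance

-- ===== CLAIM (what is proved, stated in full; the proofs are below) =====
def Claim_equal_kolla_fyra_av_samma : Prop := ∀ (spelare : List Int), Dom_kolla_fyra_av_samma spelare → Spec_kolla_fyra_av_samma spelare (kolla_fyra_av_samma spelare)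

-- ===== LEMMAS AND PROOFS =====

-- one `spelare.remove(kort)` step never changes the count of a different value
theorem pv_count_removeStep (l : List Int) (k k' : Int) (h : k' ≠ k) :
    ((PySem.List.remove? l k).getD l).count k' = l.count k' := by
  by_cases hm : k ∈ l
  · rw [PySem.List.remove?_eq_some_erase _ _ hm]
    simp [List.count_erase_of_ne h]
  · rw [(PySem.List.remove?_eq_none_iff l k).mpr hm]
    rfl

theorem pv_count_remove4 (l : List Int) (k k' : Int) (h : k' ≠ k) :
    (((PySem.List.pyRange 0 4 1).foldl
        (fun l _ => (PySem.List.remove? l k).getD l) l).count k') = l.count k' := by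
  have : PySem.List.pyRange 0 4 1 = [0, 1, 2, 3] := by decide
  rw [this]
  simp only [List.foldl_cons, List.foldl_nil,
    pv_count_removeStep _ k k' h]

-- A's fold counts the distinct values whose ORIGINAL count is 4
theorem pv_foldA (orig : List Int) (ds : List Int) (cur : List Int) (p : Int)
    (hd : ds.Nodup) (hc : ∀ k ∈ ds, cur.count k = orig.count k) :
    (ds.foldl
      (fun st kort =>
        if st.1.count kort == 4 then
          ((PySem.List.pyRange 0 4 1).foldl
            (fun l _ => (PySem.List.remove? l kort).getD l) st.1, st.2 + 1)
        else st)
      (cur, p)).2 = p + (ds.countP (fun k => orig.count k == 4) : Int) := by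
  induction ds generalizing cur p with
  | nil => simp
  | cons k tl ih =>
    have hk : cur.count k = orig.count k := hc k (by simp)
    have htl : ∀ k' ∈ tl, k' ≠ k := by
      intro k' hk' he; exact (List.nodup_cons.mp hd).1 (he ▸ hk')
    have hdtl : tl.Nodup := (List.nodup_cons.mp hd).2
    simp only [List.foldl_cons, List.countP_cons]
    by_cases h4 : orig.count k = 4
    · rw [if_pos (by simp [hk, h4])]
      rw [ih _ _ hdtl (fun k' hk' => by
        rw [pv_count_remove4 _ k k' (htl k' hk')]; exact hc k' (by simp [hk']))]
      simp [h4]; ring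
    · rw [if_neg (by simp [hk, h4])]
      rw [ih _ _ hdtl (fun k' hk' => hc k' (by simp [hk']))]
      simp [h4]

theorem pv_A_eq (spelare : List Int) :
    kolla_fyra_av_samma spelare
      = (((PySem.Set.ofList spelare).countP (fun k => spelare.count k == 4) : Nat) : Int) := by
  unfold kolla_fyra_av_samma
  rw [pv_foldA spelare _ spelare 0 (PySem.Set.nodup_ofList spelare) (fun _ _ => rfl)]
  simp

theorem pv_B_eq (spelare : List Int) :
    kolla_fyra_av_samma_alt spelare
      = (((PySem.Set.ofList spelare).countP (fun k => spelare.count k == 4) : Nat) : Int) := by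
  simp only [kolla_fyra_av_samma_alt]
  rw [PySem.Dict.foldl_insert_getD_add_one_eq_counter, PySem.Dict.items_counter]
  rw [List.filter_map, List.map_map]
  have hfl : (PySem.Set.ofList spelare).filter
      ((fun (p : Int × Int) => p.2 == 4) ∘ fun k => (k, (spelare.count k : Int)))
      = (PySem.Set.ofList spelare).filter (fun k => spelare.count k == 4) := by
    apply List.filter_congr
    intro x _
    simp [Function.comp]
    omega
  rw [hfl]
  have hmap : List.map ((fun (x : Int × Int) => x.1) ∘ fun k => (k, (spelare.count k : Int)))
      ((PySem.Set.ofList spelare).filter (fun k => spelare.count k == 4))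
      = (PySem.Set.ofList spelare).filter (fun k => spelare.count k == 4) := by
    exact List.map_id'' (congrFun rfl) _
  rw [hmap]
  rw [PySem.Set.ofList_eq_self_of_nodup _
    ((PySem.Set.nodup_ofList spelare).filter _)]
  simp [PySem.Set.len, List.countP_eq_length_filter]

-- ===== VERDICT (by name: the statement is the Claim_ definition above) =====
theorem kolla_fyra_av_samma_spec : Claim_equal_kolla_fyra_av_samma := by
  intro spelare _
  unfold Spec_kolla_fyra_av_samma
  rw [pv_A_eq, pv_B_eq]
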